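-- pv_equiv track=rewrite | github.com/hybridlca/EPiC_Grasshopper | epic/epic.py | _get_accumulated_number_of_instances
-- ===== SOURCE A (Python) =====
-- def _get_accumulated_number_of_instances(period_of_analysis, service_life, include_initial=True):
--     """
--     Generates a list representing the number of replacements of a material or assembly to date. The length of that list is
--     equal to period of built_assets
--     :param period_of_analysis: the period of built_assets in years
--     :param service_life: the service of the material or assembly
--     :param include_initial: boolean flag that specifies if the initial installation should be included
--     :return: a list of integers representing the accumulated number of material/assembly in the building at a given year
--     """
--
--     if include_initial:
--         acc_num_instances = [1] * period_of_analysis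
--     else:
--         acc_num_instances = [0] * period_of_analysis
--
--     num_replacements = _get_num_replacements(period_of_analysis=period_of_analysis, service_life=service_life)
--
--     if num_replacements == 0:
--         pass
--     else:
--         for replacement in range(1, num_replacements + 1):
--             acc_num_instances[replacement * service_life:] = [num_instances + 1 for num_instances in
--                                                               acc_num_instances[replacement * service_life:]]
--
--     return acc_num_instances
--
-- def _get_num_replacements(period_of_analysis, service_life):
--     """
--     Calculates the number of material replacements
--     :param period_of_analysis: the period of built_assets in years
--     :param service_life: the service_life in years
--     :return: an integer, representing the number of replacements
--     """
--     if service_life >= period_of_analysis: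
--         return 0
--     else:
--         if period_of_analysis % service_life == 0:
--             return period_of_analysis // service_life - 1
--         else:
--             return period_of_analysis // service_life
-- ===== SOURCE B (Python) =====
-- def _get_accumulated_number_of_instances(period_of_analysis, service_life, include_initial=True):
--     base = 1 if include_initial else 0
--     if service_life >= period_of_analysis:
--         num_replacements = 0
--     elif period_of_analysis % service_life == 0:
--         num_replacements = period_of_analysis // service_life - 1
--     else:
--         num_replacements = period_of_analysis // service_life
--     if num_replacements <= 0:
--         return [base] * period_of_analysis
--     return [base + min(num_replacements, year // service_life)
--             for year in range(period_of_analysis)]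
-- ===== Notes on version B (the rewrite author's own statement) =====
-- stated objective: simpler
-- what changed: Replaces the loop that repeatedly bumps a shrinking suffix of the list (one pass per replacement) with a single comprehension computing each year's count directly as base + min(num_replacements, year // service_life).
import Mathlib
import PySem

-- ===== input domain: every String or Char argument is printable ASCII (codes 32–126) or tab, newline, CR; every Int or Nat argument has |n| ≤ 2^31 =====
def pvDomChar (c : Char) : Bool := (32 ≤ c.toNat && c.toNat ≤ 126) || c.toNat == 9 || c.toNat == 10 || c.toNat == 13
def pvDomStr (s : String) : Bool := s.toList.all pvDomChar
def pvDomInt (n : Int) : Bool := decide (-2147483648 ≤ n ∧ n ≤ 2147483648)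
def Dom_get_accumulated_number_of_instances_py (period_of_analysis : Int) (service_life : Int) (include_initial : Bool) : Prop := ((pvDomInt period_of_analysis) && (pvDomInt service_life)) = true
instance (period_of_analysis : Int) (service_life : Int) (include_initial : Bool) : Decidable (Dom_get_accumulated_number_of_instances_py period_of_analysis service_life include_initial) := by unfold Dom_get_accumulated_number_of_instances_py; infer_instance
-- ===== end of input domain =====

-- B replaces A's per-replacement suffix-bumping loop by one direct pass computing each
-- year's count as base + min(num_replacements, year // service_life); objective: simpler.

-- ===== PORT A =====
-- port of helper _get_num_replacements
def pvNumReplacements (period_of_analysis : Int) (service_life : Int) : Int :=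
  if service_life ≥ period_of_analysis then 0
  else if PySem.Int.mod period_of_analysis service_life = 0 then
    PySem.Int.floordiv period_of_analysis service_life - 1
  else PySem.Int.floordiv period_of_analysis service_life

def get_accumulated_number_of_instances_py (period_of_analysis : Int) (service_life : Int) (include_initial : Bool) : List Int :=
  let acc : List Int :=
    if include_initial then List.replicate period_of_analysis.toNat 1
    else List.replicate period_of_analysis.toNat 0
  let num := pvNumReplacements period_of_analysis service_life
  if num = 0 then acc
  else
    (PySem.List.pyRange 1 (num + 1) 1).foldl
      (fun a r =>
        -- acc[k:] = [x + 1 for x in acc[k:]]  with k = replacement * service_life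
        PySem.List.slice a none (some (r * service_life)) ++
          (PySem.List.slice a (some (r * service_life)) none).map (· + 1))
      acc

-- ===== PORT B =====
def get_accumulated_number_of_instances_py_alt (period_of_analysis : Int) (service_life : Int) (include_initial : Bool) : List Int :=
  let base : Int := if include_initial then 1 else 0
  let num : Int :=
    if service_life ≥ period_of_analysis then 0
    else if PySem.Int.mod period_of_analysis service_life = 0 then
      PySem.Int.floordiv period_of_analysis service_life - 1
    else PySem.Int.floordiv period_of_analysis service_life
  if num ≤ 0 then List.replicate period_of_analysis.toNat base
  else (PySem.List.pyRange 0 period_of_analysis 1).map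
    (fun year => base + min num (PySem.Int.floordiv year service_life))

-- ===== PRECONDITION & SPEC =====
-- Pre_ excludes exactly service_life = 0 with period_of_analysis > 0, where Python's
-- '%'/'//' (in A and in B alike) raise ZeroDivisionError.
def Pre_get_accumulated_number_of_instances_py (period_of_analysis : Int) (service_life : Int) (include_initial : Bool) : Prop :=
  ¬ (service_life = 0 ∧ 0 < period_of_analysis)
instance (period_of_analysis : Int) (service_life : Int) (include_initial : Bool) : Decidable (Pre_get_accumulated_number_of_instances_py period_of_analysis service_life include_initial) := by unfold Pre_get_accumulated_number_of_instances_py; infer_instance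

def pvWitness_get_accumulated_number_of_instances_py : Int × Int × Bool := (10, 3, true)

def Spec_get_accumulated_number_of_instances_py (period_of_analysis : Int) (service_life : Int) (include_initial : Bool) (out : List Int) : Prop := out = get_accumulated_number_of_instances_py_alt period_of_analysis service_life include_initial
instance (period_of_analysis : Int) (service_life : Int) (include_initial : Bool) (out : List Int) : Decidable (Spec_get_accumulated_number_of_instances_py period_of_analysis service_life include_initial out) := by unfold Spec_get_accumulated_number_of_instances_py; infer_instance

-- ===== CLAIM (what is proved, stated in full; the proofs are below) =====
def Claim_equal_get_accumulated_number_of_instances_py : Prop := ∀ (period_of_analysis : Int) (service_life : Int) (include_initial : Bool), Dom_get_accumulated_number_of_instances_py period_of_analysis service_life include_initial → Pre_get_accumulated_number_of_instances_py period_of_analysis service_life include_initial → Spec_get_accumulated_number_of_instances_py period_of_analysis service_life include_initial (get_accumulated_number_of_instances_py period_of_analysis service_life include_initial)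

-- ===== LEMMAS AND PROOFS =====

-- num_replacements > 0 forces 0 < service_life < period (given Pre_).
theorem pvNum_pos_facts (p sl : Int) (hpre : ¬ (sl = 0 ∧ 0 < p))
    (h : 0 < pvNumReplacements p sl) : 0 < sl ∧ sl < p := by
  unfold pvNumReplacements at h
  by_cases hge : sl ≥ p
  · simp [hge] at h
  · have hlt : sl < p := by omega
    refine ⟨?_, hlt⟩
    by_contra hns
    have hsl : sl < 0 := by
      rcases lt_or_eq_of_le (by omega : sl ≤ 0) with h' | h'
      · exact h'
      · exact absurd ⟨h', by omega⟩ hpre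
    have hkey := PySem.Int.floordiv_mul_add_mod p sl
    have hb := PySem.Int.mod_neg_bounds (a := p) hsl
    have hfd : PySem.Int.floordiv p sl ≤ 0 := by nlinarith [hb.1, hb.2]
    simp only [hge, if_false] at h
    split_ifs at h <;> omega

theorem pvNum_mul_le (p sl : Int) (hsl : 0 < sl) (hlt : sl < p) :
    pvNumReplacements p sl * sl ≤ p := by
  have hkey := PySem.Int.floordiv_mul_add_mod p sl
  have hm := PySem.Int.mod_nonneg (a := p) hsl
  have : pvNumReplacements p sl ≤ PySem.Int.floordiv p sl := by
    unfold pvNumReplacements; split_ifs <;> omega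
  nlinarith [PySem.Int.floordiv_mul_add_mod p sl]

-- the invariant list after m replacement rounds
def pvStage (p sl base : Int) (m : Int) : List Int :=
  (PySem.List.pyRange 0 p 1).map (fun year => base + min m (PySem.Int.floordiv year sl))

theorem pvStage_zero (p sl base : Int) (hsl : 0 < sl) :
    pvStage p sl base 0 = List.replicate p.toNat base := by
  unfold pvStage
  have hc : ∀ x ∈ PySem.List.pyRange 0 p 1,
      base + min 0 (PySem.Int.floordiv x sl) = base := by
    intro x hx
    have hx' := (PySem.List.mem_pyRange_one).1 hx
    have h0 : 0 ≤ PySem.Int.floordiv x sl := by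
      rw [PySem.Int.le_floordiv_iff_mul_le hsl]; omega
    omega
  rw [List.map_congr_left hc, List.map_const']
  simp [PySem.List.length_pyRange_one]

-- one round of A's loop (bump the suffix from (m+1)*sl) advances the invariant
theorem pvStage_step (p sl base m : Int) (hsl : 0 < sl) (hm : 0 ≤ m)
    (hk : (m + 1) * sl ≤ p) :
    PySem.List.slice (pvStage p sl base m) none (some ((m + 1) * sl)) ++
      (PySem.List.slice (pvStage p sl base m) (some ((m + 1) * sl)) none).map (· + 1)
    = pvStage p sl base (m + 1) := by
  set k : Int := (m + 1) * sl with hkdef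
  have hk0 : 0 ≤ k := by positivity
  rw [PySem.List.slice_to _ hk0, PySem.List.slice_from _ hk0]
  unfold pvStage
  have hsplit : PySem.List.pyRange 0 p 1 =
      PySem.List.pyRange 0 k 1 ++ PySem.List.pyRange k p 1 :=
    PySem.List.pyRange_one_append 0 k p hk0 hk
  have hlen : ((PySem.List.pyRange 0 k 1).map
      (fun year => base + min m (PySem.Int.floordiv year sl))).length = k.toNat := by
    simp [PySem.List.length_pyRange_one]
  rw [hsplit, List.map_append, List.map_append,
      List.take_append_of_le_length (le_of_eq hlen.symm),
      List.take_of_length_le (le_of_eq hlen),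
      List.drop_append_of_le_length (le_of_eq hlen.symm),
      List.drop_of_length_le (le_of_eq hlen)]
  simp only [List.nil_append, List.map_map]
  congr 1
  · apply List.map_congr_left
    intro x hx
    have hx' := (PySem.List.mem_pyRange_one).1 hx
    have hd0 : 0 ≤ PySem.Int.floordiv x sl := by
      rw [PySem.Int.le_floordiv_iff_mul_le hsl]; omega
    have hdm : PySem.Int.floordiv x sl < m + 1 := by
      rw [PySem.Int.floordiv_lt_iff_lt_mul hsl]; omega
    omega
  · apply List.map_congr_left
    intro x hx
    have hx' := (PySem.List.mem_pyRange_one).1 hx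
    have hdm : m + 1 ≤ PySem.Int.floordiv x sl := by
      rw [PySem.Int.le_floordiv_iff_mul_le hsl]; omega
    simp only [Function.comp]
    omega

-- A's whole loop, by induction on the number of rounds
theorem pvLoop (p sl base : Int) (hsl : 0 < sl) (hlt : sl < p) :
    ∀ (m : Nat), (m : Int) ≤ pvNumReplacements p sl →
      (PySem.List.pyRange 1 ((m : Int) + 1) 1).foldl
        (fun a r =>
          PySem.List.slice a none (some (r * sl)) ++
            (PySem.List.slice a (some (r * sl)) none).map (· + 1))
        (List.replicate p.toNat base)
      = pvStage p sl base m := by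
  intro m
  induction m with
  | zero =>
    intro _
    rw [PySem.List.pyRange_one_eq_nil (by omega)]
    simpa using (pvStage_zero p sl base hsl).symm
  | succ m ih =>
    intro hle
    have hle' : (m : Int) ≤ pvNumReplacements p sl := by push_cast at hle ⊢; omega
    have hcast : ((m + 1 : Nat) : Int) + 1 = ((m : Int) + 1) + 1 := by push_cast; ring
    rw [hcast, PySem.List.pyRange_one_succ_right (by omega), List.foldl_append, ih hle']
    simp only [List.foldl_cons, List.foldl_nil]
    have hk : ((m : Int) + 1) * sl ≤ p := by
      have h1 : ((m : Int) + 1) * sl ≤ pvNumReplacements p sl * sl := by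
        apply mul_le_mul_of_nonneg_right _ (le_of_lt hsl)
        push_cast at hle; omega
      have h2 := pvNum_mul_le p sl hsl hlt
      omega
    have := pvStage_step p sl base (m : Int) hsl (by positivity) hk
    push_cast
    exact this

-- both ports with the boolean flag already resolved to its base value
theorem pvMain (p sl base : Int) (hpre : ¬ (sl = 0 ∧ 0 < p)) :
    (if pvNumReplacements p sl = 0 then List.replicate p.toNat base
     else (PySem.List.pyRange 1 (pvNumReplacements p sl + 1) 1).foldl
       (fun a r =>
         PySem.List.slice a none (some (r * sl)) ++
           (PySem.List.slice a (some (r * sl)) none).map (· + 1))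
       (List.replicate p.toNat base))
    = (if pvNumReplacements p sl ≤ 0 then List.replicate p.toNat base
       else pvStage p sl base (pvNumReplacements p sl)) := by
  rcases lt_trichotomy (pvNumReplacements p sl) 0 with h | h | h
  · rw [if_neg (by omega), if_pos (by omega), PySem.List.pyRange_one_eq_nil (by omega)]
    simp
  · simp [h]
  · rw [if_neg (by omega), if_neg (by omega)]
    obtain ⟨hsl, hlt⟩ := pvNum_pos_facts p sl hpre h
    have hloop := pvLoop p sl base hsl hlt (pvNumReplacements p sl).toNat
      (by omega)
    rwa [Int.toNat_of_nonneg (by omega)] at hloop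

-- ===== VERDICT (by name: the statement is the Claim_ definition above) =====
theorem get_accumulated_number_of_instances_py_spec : Claim_equal_get_accumulated_number_of_instances_py := by
  intro p sl inc _ hpre
  show get_accumulated_number_of_instances_py p sl inc
      = get_accumulated_number_of_instances_py_alt p sl inc
  cases inc
  · exact pvMain p sl 0 hpre
  · exact pvMain p sl 1 hpre
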